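-- pv_equiv track=rewrite | github.com/nikhitkumar00/Hackerrank-solutions | basic-array-6.py | GEEK_MARKS
-- ===== SOURCE A (Python) =====
-- def GEEK_MARKS(marks):
--
--     sum = 0
--     count = len(marks)
--     i = 0;num = 0
--     while(num != len(marks)):
--         if marks[i] == 0:
--             marks.remove(0)
--             marks.append(0)
--             count -= 1
--         else:
--             sum += marks[i]
--             i += 1
--         num += 1
--     avg = sum//count
--     marks.append(avg)
--     return marks
-- ===== SOURCE B (Python) =====
-- def GEEK_MARKS(marks):
--     # Rebuild in one pass instead of repeated remove/append.
--     # Mutates the passed list in place via slice assignment, like A.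
--     nonzeros = [m for m in marks if m != 0]
--     avg = sum(nonzeros) // len(nonzeros)
--     marks[:] = nonzeros + [0] * (len(marks) - len(nonzeros)) + [avg]
--     return marks
-- ===== Notes on version B (the rewrite author's own statement) =====
-- stated objective: faster
-- what changed: Replaces the quadratic remove/append while-loop with a single filter pass and a closed-form rebuild (nonzeros ++ zeros ++ [avg]) written back by slice assignment.
import Mathlib
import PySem

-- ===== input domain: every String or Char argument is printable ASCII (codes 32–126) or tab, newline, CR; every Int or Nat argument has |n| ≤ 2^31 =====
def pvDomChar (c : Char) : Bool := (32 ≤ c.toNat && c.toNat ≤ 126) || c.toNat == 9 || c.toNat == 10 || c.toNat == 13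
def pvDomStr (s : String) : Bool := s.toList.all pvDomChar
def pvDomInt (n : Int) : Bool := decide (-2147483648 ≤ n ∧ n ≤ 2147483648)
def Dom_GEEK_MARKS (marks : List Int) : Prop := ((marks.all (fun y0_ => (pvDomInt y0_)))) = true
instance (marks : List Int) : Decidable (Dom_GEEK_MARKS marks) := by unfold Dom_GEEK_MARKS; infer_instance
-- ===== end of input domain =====

-- B replaces A's quadratic remove/append while-loop by one filter pass and a
-- closed-form rebuild; return value proved equal whenever A returns (Pre_: some
-- nonzero element). Both mutate the list in place; on the excluded all-zero
-- inputs both raise ZeroDivisionError (A after rearranging, B before mutating).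

-- ===== PORT A =====
-- State (marks, sum, count, i); the loop runs exactly len(marks) times since
-- remove+append keeps the length constant, so the fuel is the initial length.
-- marks[i] is always in range and remove(0) always succeeds on these runs
-- (proved in the lemmas below); the .getD defaults are never taken.
def GEEK_MARKS_loop : Nat → List Int × Int × Int × Int → List Int × Int × Int × Int
  | 0, st => st
  | k+1, (marks, sum, count, i) =>
    if PySem.List.pyGetD marks i 0 == 0 then
      GEEK_MARKS_loop k (((PySem.List.remove? marks 0).getD marks) ++ [0], sum, count - 1, i)
    else
      GEEK_MARKS_loop k (marks, sum + PySem.List.pyGetD marks i 0, count, i + 1)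

def GEEK_MARKS (marks : List Int) : List Int :=
  let st := GEEK_MARKS_loop marks.length (marks, 0, (marks.length : Int), 0)
  st.1 ++ [PySem.Int.floordiv st.2.1 st.2.2.1]

-- ===== PORT B =====
def GEEK_MARKS_alt (marks : List Int) : List Int :=
  let nonzeros := marks.filter (fun m => m != 0)
  let avg := PySem.Int.floordiv nonzeros.sum (nonzeros.length : Int)
  nonzeros ++ List.replicate (marks.length - nonzeros.length) 0 ++ [avg]

-- ===== PRECONDITION & SPEC =====
-- A raises ZeroDivisionError (0//0) exactly when the list has no nonzero
-- element (empty or all zeros); B raises there too.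
def Pre_GEEK_MARKS (marks : List Int) : Prop := (marks.any (fun m => m != 0)) = true
instance (marks : List Int) : Decidable (Pre_GEEK_MARKS marks) := by unfold Pre_GEEK_MARKS; infer_instance
def pvWitness_GEEK_MARKS : List Int := [1, 0, 2]

def Spec_GEEK_MARKS (marks : List Int) (out : List Int) : Prop := out = GEEK_MARKS_alt marks
instance (marks : List Int) (out : List Int) : Decidable (Spec_GEEK_MARKS marks out) := by unfold Spec_GEEK_MARKS; infer_instance

-- ===== CLAIM (what is proved, stated in full; the proofs are below) =====
def Claim_equal_GEEK_MARKS : Prop := ∀ (marks : List Int), Dom_GEEK_MARKS marks → Pre_GEEK_MARKS marks → Spec_GEEK_MARKS marks (GEEK_MARKS marks)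

-- ===== LEMMAS AND PROOFS =====

lemma remove_zero_append (pre t : List Int) (hpre : ∀ x ∈ pre, x ≠ 0) :
    PySem.List.remove? (pre ++ 0 :: t) 0 = some (pre ++ t) := by
  induction pre with
  | nil => simp
  | cons a pre ih =>
    rw [List.cons_append, PySem.List.remove?_cons_of_ne _ (hpre a (by simp)),
      ih (fun x hx => hpre x (by simp [hx]))]
    rfl

lemma getD_append_mid (pre t : List Int) (r : Int) :
    (pre ++ r :: t).getD pre.length 0 = r := by
  simp [List.getD]

lemma loop_inv (rest pre : List Int) (z : Nat) (s c : Int)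
    (hpre : ∀ x ∈ pre, x ≠ 0) :
    GEEK_MARKS_loop rest.length (pre ++ rest ++ List.replicate z 0, s, c, (pre.length : Int)) =
    (pre ++ rest.filter (fun m => m != 0) ++
        List.replicate (z + (rest.filter (fun m => m == 0)).length) 0,
     s + (rest.filter (fun m => m != 0)).sum,
     c - ((rest.filter (fun m => m == 0)).length : Int),
     ((pre ++ rest.filter (fun m => m != 0)).length : Int)) := by
  induction rest generalizing pre z s c with
  | nil => simp [GEEK_MARKS_loop]
  | cons r rest ih =>
    have hget : PySem.List.pyGetD (pre ++ (r :: rest) ++ List.replicate z 0) (pre.length : Int) 0 = r := by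
      rw [List.append_assoc, List.cons_append, PySem.List.pyGetD_natCast, getD_append_mid]
    by_cases hr : r = 0
    · subst hr
      have hrem : PySem.List.remove? (pre ++ (0 :: rest) ++ List.replicate z 0) 0
          = some (pre ++ rest ++ List.replicate z 0) := by
        rw [List.append_assoc, List.cons_append, remove_zero_append pre _ hpre, List.append_assoc]
      rw [List.length_cons, GEEK_MARKS_loop, hget]
      simp only [hrem, Option.getD_some, beq_self_eq_true, if_true]
      have hlist : pre ++ rest ++ List.replicate z 0 ++ [(0:Int)]
          = pre ++ rest ++ List.replicate (z + 1) 0 := by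
        simp [List.replicate_succ', List.append_assoc]
      rw [hlist, ih pre (z + 1) s (c - 1) hpre]
      simp only [List.filter_cons]
      norm_num
      constructor
      · ring_nf
      · ring
    · rw [List.length_cons, GEEK_MARKS_loop, hget, if_neg (by simpa using hr)]
      have hlist : pre ++ (r :: rest) ++ List.replicate z 0
          = (pre ++ [r]) ++ rest ++ List.replicate z 0 := by
        simp [List.append_assoc]
      have hlen : (pre.length : Int) + 1 = ((pre ++ [r]).length : Int) := by
        simp
      rw [hlist, hlen, ih (pre ++ [r]) z (s + r) c
            (by intro x hx; rcases List.mem_append.mp hx with h | h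
                · exact hpre x h
                · simp at h; omega)]
      simp only [List.filter_cons]
      have hne : ((r != 0)) = true := by simpa using hr
      have heq : ((r == 0)) = false := by simpa using hr
      rw [hne, heq]
      simp [List.append_assoc, add_assoc]

lemma length_split (marks : List Int) :
    marks.length = (marks.filter (fun m => m != 0)).length
      + (marks.filter (fun m => m == 0)).length := by
  induction marks with
  | nil => rfl
  | cons a t ih =>
    by_cases h : a = 0 <;> simp [h, ih] <;> omega

-- ===== VERDICT (by name: the statement is the Claim_ definition above) =====
theorem GEEK_MARKS_spec : Claim_equal_GEEK_MARKS := by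
  intro marks _ _
  unfold Spec_GEEK_MARKS GEEK_MARKS GEEK_MARKS_alt
  have h := loop_inv marks [] 0 0 (marks.length : Int) (by simp)
  simp only [List.nil_append, List.replicate_zero, List.append_nil, zero_add,
    List.length_nil, Nat.cast_zero] at h
  simp only [h]
  have hsplit := length_split marks
  have hc : (marks.length : Int) - ((marks.filter (fun m => m == 0)).length : Int)
      = ((marks.filter (fun m => m != 0)).length : Int) := by
    omega
  have hz : marks.length - (marks.filter (fun m => m != 0)).length
      = (marks.filter (fun m => m == 0)).length := by omega
  simp [hc, hz]
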